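-- pv_equiv track=rewrite | github.com/nd7141/InfluencerEmbeddings | Embeddings.py | walk2pattern
-- ===== SOURCE A (Python) =====
-- def walk2pattern(walk):
--     '''Converts a walk with arbitrary nodes to anonymous walks, without considering labels.'''
--     idx = 0
--     pattern = []
--     d = dict()
--     for node in walk:
--         if node not in d:
--             d[node] = idx
--             idx += 1
--         pattern.append(d[node])
--     return tuple(pattern)
-- ===== SOURCE B (Python) =====
-- def walk2pattern(walk):
--     '''Converts a walk with arbitrary nodes to anonymous walks, without considering labels.'''
--     return tuple(len(set(walk[:walk.index(node)])) for node in walk)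
-- ===== Notes on version B (the rewrite author's own statement) =====
-- stated objective: alternative
-- what changed: Replaces A's stateful loop (dict + running counter + appended list) with a stateless declarative definition: each node's label is the number of distinct nodes strictly before its first occurrence, computed per element via walk.index and a prefix set, with no dict and no accumulated state.
import Mathlib
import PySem

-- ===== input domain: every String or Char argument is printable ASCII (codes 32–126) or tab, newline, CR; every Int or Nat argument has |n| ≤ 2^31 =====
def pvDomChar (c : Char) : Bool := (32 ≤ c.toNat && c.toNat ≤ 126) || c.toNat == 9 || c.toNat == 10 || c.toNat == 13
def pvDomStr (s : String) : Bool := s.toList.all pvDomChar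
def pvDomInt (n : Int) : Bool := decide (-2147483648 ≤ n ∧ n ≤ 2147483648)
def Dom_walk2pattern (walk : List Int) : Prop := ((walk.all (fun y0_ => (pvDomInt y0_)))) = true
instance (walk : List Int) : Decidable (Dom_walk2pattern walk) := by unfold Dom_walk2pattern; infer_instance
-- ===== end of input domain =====

-- B replaces A's stateful dict-and-counter loop by a stateless per-element formula: the label of each node is the number of distinct nodes strictly before its first occurrence (alternative algorithm; quadratic, not faster).


-- ===== PORT A =====
-- the for-loop of A, one recursive step per node, carrying (idx, d, pattern)
def w2pLoop (walk : List Int) (idx : Int) (d : PySem.Dict Int Int) (pattern : List Int) : List Int :=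
  match walk with
  | [] => pattern
  | node :: rest =>
    if d.contains node then
      w2pLoop rest idx d (pattern ++ [d.getD node 0])
    else
      w2pLoop rest (idx + 1) (d.insert node idx) (pattern ++ [(d.insert node idx).getD node 0])

def walk2pattern (walk : List Int) : List Int :=
  w2pLoop walk 0 PySem.Dict.empty []

-- ===== PORT B =====
-- tuple(len(set(walk[:walk.index(node)])) for node in walk): node is always a member of walk,
-- so walk.index never raises and returns a Nat k; walk[:k] is List.take k (PySem.List.slice_to_natCast).
def walk2pattern_alt (walk : List Int) : List Int :=
  walk.map (fun node =>
    ((PySem.Set.ofList (walk.take ((PySem.List.index? walk node).getD 0))).length : Int))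

-- ===== PRECONDITION & SPEC =====
def Spec_walk2pattern (walk : List Int) (out : List Int) : Prop := out = walk2pattern_alt walk
instance (walk : List Int) (out : List Int) : Decidable (Spec_walk2pattern walk out) := by unfold Spec_walk2pattern; infer_instance

-- ===== CLAIM (what is proved, stated in full; the proofs are below) =====
def Claim_equal_walk2pattern : Prop := ∀ (walk : List Int), Dom_walk2pattern walk → Spec_walk2pattern walk (walk2pattern walk)

-- ===== LEMMAS AND PROOFS =====

-- first-occurrence index of n in u, as an Int (0 if absent)
def pidx (u : List Int) (n : Int) : Int := (((PySem.List.index? u n).getD 0 : Nat) : Int)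

-- the table A builds, reconstructed as a fold over enumerate of the deduped prefix
def bmap (u : List Int) (s : Int) (d : PySem.Dict Int Int) : PySem.Dict Int Int :=
  (PySem.List.enumerate u s).foldl (fun (d : PySem.Dict Int Int) p => d.insert p.2 p.1) d

lemma bmap_nil (s : Int) (d : PySem.Dict Int Int) : bmap [] s d = d := by
  simp [bmap, PySem.List.enumerate_nil]

lemma bmap_cons (a : Int) (u : List Int) (s : Int) (d : PySem.Dict Int Int) :
    bmap (a :: u) s d = bmap u (s + 1) (d.insert a s) := by
  simp [bmap, PySem.List.enumerate_cons]

lemma getD_bmap_not_mem {u : List Int} {n : Int} (h : n ∉ u) (s : Int) (d : PySem.Dict Int Int) :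
    (bmap u s d).getD n 0 = d.getD n 0 := by
  induction u generalizing s d with
  | nil => simp [bmap_nil]
  | cons a u ih =>
    rw [bmap_cons, ih (by simp_all), PySem.Dict.getD_insert_of_ne]
    intro hna; exact h (by simp [hna])

lemma contains_bmap (u : List Int) (n : Int) (s : Int) (d : PySem.Dict Int Int) :
    (bmap u s d).contains n = (decide (n ∈ u) || d.contains n) := by
  induction u generalizing s d with
  | nil => simp [bmap_nil]
  | cons a u ih =>
    rw [bmap_cons, ih, PySem.Dict.contains_insert]
    by_cases h : n = a
    · simp [h]
    · have hb : (n == a) = false := by simp [h]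
      simp [h, hb]

lemma pidx_cons_self (a : Int) (u : List Int) : pidx (a :: u) a = 0 := by
  rw [pidx, PySem.List.index?_cons_self]
  rfl

lemma getD_bmap {u : List Int} (hu : u.Nodup) {n : Int} (hn : n ∈ u) (s : Int) (d : PySem.Dict Int Int) :
    (bmap u s d).getD n 0 = s + pidx u n := by
  induction u generalizing s d with
  | nil => simp at hn
  | cons a u ih =>
    rw [bmap_cons]
    by_cases h : n = a
    · subst h
      rw [getD_bmap_not_mem (by simp_all) _ _, PySem.Dict.getD_insert_self, pidx_cons_self]
      ring
    · have hnu : n ∈ u := by cases hn with | head => exact absurd rfl h | tail _ h' => exact h'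
      rw [ih hu.of_cons hnu]
      cases hix : PySem.List.index? u n with
      | none =>
        rw [PySem.List.index?_eq_none_iff] at hix
        exact absurd hnu hix
      | some k =>
        have hx : pidx (a :: u) n = pidx u n + 1 := by
          rw [pidx, pidx, PySem.List.index?_cons_of_ne u (show a ≠ n from fun h' => h h'.symm), hix]
          simp
        rw [hx]; ring

lemma bmap_append_singleton (u : List Int) (n : Int) (s : Int) (d : PySem.Dict Int Int) :
    bmap (u ++ [n]) s d = (bmap u s d).insert n (s + u.length) := by
  simp [bmap, PySem.List.enumerate_append, PySem.List.enumerate_cons, List.foldl_append]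

lemma dedup_append_singleton (p : List Int) (n : Int) :
    PySem.List.dedup (p ++ [n]) =
      if n ∈ p then PySem.List.dedup p else PySem.List.dedup p ++ [n] := by
  rw [PySem.List.dedup_eq_ofList, PySem.List.dedup_eq_ofList, PySem.Set.ofList_eq_foldl,
    PySem.Set.ofList_eq_foldl, List.foldl_append]
  simp only [List.foldl_cons, List.foldl_nil, PySem.Set.add]
  by_cases h : n ∈ p
  · simp [PySem.Set.contains, ← PySem.Set.ofList_eq_foldl, PySem.Set.mem_ofList, h]
  · simp [PySem.Set.contains, ← PySem.Set.ofList_eq_foldl, PySem.Set.mem_ofList, h]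

lemma pidx_stable {p : List Int} {m : Int} (h : m ∈ p) (t : List Int) :
    pidx (PySem.List.dedup p ++ t) m = pidx (PySem.List.dedup p) m := by
  rw [pidx, pidx, PySem.List.index?_append_of_mem t ((PySem.List.mem_dedup p m).mpr h)]

lemma pidx_dedup_append_self {p : List Int} {n : Int} (h : n ∉ p) :
    pidx (PySem.List.dedup p ++ [n]) n = ((PySem.List.dedup p).length : Int) := by
  rw [pidx, PySem.List.index?_append_singleton_self (PySem.List.dedup p) n
    (show n ∉ PySem.List.dedup p from fun hc => h ((PySem.List.mem_dedup p n).mp hc))]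
  rfl

-- the core invariant: the loop of A, started from the state reached after a prefix p, produces the first-occurrence labelling
lemma loop_spec (q p : List Int) :
    w2pLoop q ((PySem.List.dedup p).length) (bmap (PySem.List.dedup p) 0 PySem.Dict.empty)
      (p.map (pidx (PySem.List.dedup p)))
    = (p ++ q).map (pidx (PySem.List.dedup (p ++ q))) := by
  induction q generalizing p with
  | nil => rw [w2pLoop, List.append_nil]
  | cons node q ih =>
    have hcb : (bmap (PySem.List.dedup p) 0 PySem.Dict.empty).contains node
        = decide (node ∈ p) := by
      rw [contains_bmap]
      simp [PySem.List.mem_dedup]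
    have hassoc : p ++ node :: q = (p ++ [node]) ++ q := by simp
    rw [w2pLoop, hcb]
    by_cases h : node ∈ p
    · rw [if_pos (by simp [h])]
      have hd : PySem.List.dedup (p ++ [node]) = PySem.List.dedup p := by
        rw [dedup_append_singleton, if_pos h]
      have hget : (bmap (PySem.List.dedup p) 0 PySem.Dict.empty).getD node 0
          = pidx (PySem.List.dedup p) node := by
        rw [getD_bmap (PySem.List.nodup_dedup p) ((PySem.List.mem_dedup p node).mpr h) 0]
        ring
      have hpat : (p.map (pidx (PySem.List.dedup p)))
            ++ [(bmap (PySem.List.dedup p) 0 PySem.Dict.empty).getD node 0]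
          = (p ++ [node]).map (pidx (PySem.List.dedup (p ++ [node]))) := by
        rw [hd, List.map_append, List.map_cons, List.map_nil, hget]
      rw [hpat, hassoc, ← hd]
      exact ih (p ++ [node])
    · rw [if_neg (by simp [h])]
      have hd : PySem.List.dedup (p ++ [node]) = PySem.List.dedup p ++ [node] := by
        rw [dedup_append_singleton, if_neg h]
      have hdict : (bmap (PySem.List.dedup p) 0 PySem.Dict.empty).insert node
            ((PySem.List.dedup p).length : Int)
          = bmap (PySem.List.dedup (p ++ [node])) 0 PySem.Dict.empty := by
        rw [hd, bmap_append_singleton]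
        ring_nf
      have hlen : ((PySem.List.dedup p).length : Int) + 1
          = ((PySem.List.dedup (p ++ [node])).length : Int) := by
        rw [hd, List.length_append]
        push_cast
        simp
      have hpat : (p.map (pidx (PySem.List.dedup p)))
            ++ [((bmap (PySem.List.dedup p) 0 PySem.Dict.empty).insert node
                  ((PySem.List.dedup p).length : Int)).getD node 0]
          = (p ++ [node]).map (pidx (PySem.List.dedup (p ++ [node]))) := by
        rw [PySem.Dict.getD_insert_self, hd, List.map_append, List.map_cons, List.map_nil,
          pidx_dedup_append_self h]
        congr 1
        exact List.map_congr_left (fun m hm => (pidx_stable hm [node]).symm)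
      rw [hpat, hdict, hlen, hassoc]
      exact ih (p ++ [node])

-- dedup of an appended list extends dedup of the prefix
lemma dedup_append_exists (u v : List Int) :
    ∃ t, PySem.List.dedup (u ++ v) = PySem.List.dedup u ++ t := by
  induction v using List.reverseRecOn with
  | nil => exact ⟨[], by simp⟩
  | append_singleton v x ih =>
    obtain ⟨t, ht⟩ := ih
    rw [← List.append_assoc, dedup_append_singleton]
    by_cases h : x ∈ u ++ v
    · exact ⟨t, by rw [if_pos h, ht]⟩
    · exact ⟨t ++ [x], by rw [if_neg h, ht, List.append_assoc]⟩

-- B's per-element value equals the first-occurrence index in the deduped walk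
lemma pidx_eq_prefix_card {walk : List Int} {n : Int} (hn : n ∈ walk) :
    pidx (PySem.List.dedup walk) n
      = ((PySem.Set.ofList (walk.take ((PySem.List.index? walk n).getD 0))).length : Int) := by
  cases hix : PySem.List.index? walk n with
  | none => exact absurd hn ((PySem.List.index?_eq_none_iff _ _).mp hix)
  | some k =>
    obtain ⟨pre, suf, hw, hlen, hpre⟩ := (PySem.List.index?_eq_some_iff walk n k).mp hix
    have htake : walk.take k = pre := by
      rw [hw, ← hlen, List.take_left]
    obtain ⟨t, ht⟩ := dedup_append_exists (pre ++ [n]) suf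
    have hdw : PySem.List.dedup walk = (PySem.List.dedup pre ++ [n]) ++ t := by
      rw [hw, show pre ++ n :: suf = (pre ++ [n]) ++ suf by simp, ht,
        dedup_append_singleton, if_neg hpre]
    have hnd : n ∉ PySem.List.dedup pre := fun hc => hpre ((PySem.List.mem_dedup pre n).mp hc)
    have hidx : PySem.List.index? (PySem.List.dedup pre ++ [n] ++ t) n
        = some (PySem.List.dedup pre).length := by
      rw [PySem.List.index?_append_of_mem t (by simp),
        PySem.List.index?_append_singleton_self (PySem.List.dedup pre) n hnd]
    rw [hdw, pidx, hidx]
    simp only [Option.getD_some]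
    rw [htake, ← PySem.List.dedup_eq_ofList]

-- ===== VERDICT (by name: the statement is the Claim_ definition above) =====
theorem walk2pattern_spec : Claim_equal_walk2pattern := by
  intro walk _
  show walk2pattern walk = walk2pattern_alt walk
  have h := loop_spec walk []
  rw [walk2pattern]
  rw [show w2pLoop walk 0 PySem.Dict.empty [] = walk.map (pidx (PySem.List.dedup walk)) by
    simpa [bmap_nil] using h]
  exact List.map_congr_left (fun n hn => pidx_eq_prefix_card hn)
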